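-- pv_equiv track=rewrite | github.com/jongyeol2/BaekJoon_Algorithm | 프로그래머스/1/82612. 부족한 금액 계산하기/부족한 금액 계산하기.py | solution
-- ===== SOURCE A (Python) =====
-- def solution(price, money, count):
--     total = 0
--     for i in range(1,count+1):
--         total += price*i
--
--     if (money - total) >= 0:
--         answer = 0
--     else:
--         answer = abs(money-total)
--
--     return answer
-- ===== SOURCE B (Python) =====
-- def solution(price, money, count):
--     c = max(count, 0)
--     total = price * c * (c + 1) // 2
--     return max(0, total - money)
-- ===== Notes on version B (the rewrite author's own statement) =====
-- stated objective: faster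
-- what changed: Replaced the O(count) summation loop with the arithmetic-series closed form price*c*(c+1)//2 and an explicit max for the shortfall.
import Mathlib
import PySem

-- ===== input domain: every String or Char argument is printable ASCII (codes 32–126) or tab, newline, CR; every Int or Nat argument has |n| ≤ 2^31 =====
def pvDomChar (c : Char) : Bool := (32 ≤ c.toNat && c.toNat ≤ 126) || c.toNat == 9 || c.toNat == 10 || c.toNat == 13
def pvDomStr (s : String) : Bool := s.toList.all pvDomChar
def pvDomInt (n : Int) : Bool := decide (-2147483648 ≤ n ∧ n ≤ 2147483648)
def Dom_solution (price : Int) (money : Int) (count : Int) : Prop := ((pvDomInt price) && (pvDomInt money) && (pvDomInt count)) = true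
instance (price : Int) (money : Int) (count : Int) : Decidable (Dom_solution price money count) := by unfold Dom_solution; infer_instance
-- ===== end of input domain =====

-- ===== PORT A =====
-- B replaces A's O(count) summation loop with the O(1) arithmetic-series closed form.
def solution (price : Int) (money : Int) (count : Int) : Int :=
  let total := (PySem.List.pyRange 1 (count + 1) 1).foldl (fun t i => t + price * i) 0
  if money - total ≥ 0 then 0 else |money - total|

-- ===== PORT B =====
def solution_alt (price : Int) (money : Int) (count : Int) : Int :=
  let c := max count 0
  let total := PySem.Int.floordiv (price * c * (c + 1)) 2
  max 0 (total - money)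

-- ===== PRECONDITION & SPEC =====
def Spec_solution (price : Int) (money : Int) (count : Int) (out : Int) : Prop := out = solution_alt price money count
instance (price : Int) (money : Int) (count : Int) (out : Int) : Decidable (Spec_solution price money count out) := by unfold Spec_solution; infer_instance

-- ===== CLAIM (what is proved, stated in full; the proofs are below) =====
def Claim_equal_solution : Prop := ∀ (price : Int) (money : Int) (count : Int), Dom_solution price money count → Spec_solution price money count (solution price money count)

-- ===== LEMMAS AND PROOFS =====

-- Twice A's loop sum is price * n * (n+1) (avoids division in the induction).
theorem sum_loop_closed (price : Int) (n : Nat) :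
    ((PySem.List.pyRange 1 ((n : Int) + 1) 1).foldl (fun t i => t + price * i) 0) * 2
      = price * (n : Int) * ((n : Int) + 1) := by
  induction n with
  | zero => simp [PySem.List.pyRange]
  | succ k ih =>
    have h : PySem.List.pyRange 1 ((k : Int) + 1 + 1) 1
        = PySem.List.pyRange 1 ((k : Int) + 1) 1 ++ [(k : Int) + 1] := by
      have := PySem.List.pyRange_one_succ_right (a := 1) (b := (k : Int) + 1) (by omega)
      simpa using this
    push_cast
    rw [h, List.foldl_append]
    simp only [List.foldl_cons, List.foldl_nil]
    nlinarith [ih]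

theorem floordiv_two_mul (x : Int) : PySem.Int.floordiv (x * 2) 2 = x := by
  simp [PySem.Int.floordiv, Int.mul_fdiv_cancel _ (by norm_num : (2:Int) ≠ 0)]

-- ===== VERDICT (by name: the statement is the Claim_ definition above) =====
theorem solution_spec : Claim_equal_solution := by
  intro price money count _
  unfold Spec_solution solution solution_alt
  by_cases hc : 0 ≤ count
  · obtain ⟨n, rfl⟩ := Int.eq_ofNat_of_zero_le hc
    have hmax : max (n : Int) 0 = (n : Int) := by omega
    rw [hmax]
    have hS := sum_loop_closed price n
    set S := (PySem.List.pyRange 1 ((n : Int) + 1) 1).foldl (fun t i => t + price * i) 0 with hSdef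
    have hT : PySem.Int.floordiv (price * (n : Int) * ((n : Int) + 1)) 2 = S := by
      rw [← hS, floordiv_two_mul]
    simp only [ge_iff_le, hT]
    split_ifs with h
    · omega
    · rw [abs_of_neg (by omega)]; omega
  · have hempty : PySem.List.pyRange 1 (count + 1) 1 = [] := by
      simp [PySem.List.pyRange_one]
      omega
    have hmax : max count 0 = 0 := by omega
    rw [hempty, hmax]
    simp only [List.foldl_nil, ge_iff_le]
    have h0 : PySem.Int.floordiv (price * 0 * (0 + 1)) 2 = 0 := by
      simp [PySem.Int.floordiv]
    rw [h0]
    split_ifs with h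
    · omega
    · rw [abs_of_neg (by omega)]; omega
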